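-- pv_equiv track=rewrite | github.com/timbel-jybae/webfos | src/webfos/agents/room_agent.py | _extract_new_text
-- ===== SOURCE A (Python) =====
-- def _extract_new_text(current_text: str, previous_text: str) -> str:
--     """
--     [advice from AI] 이전 텍스트와 비교하여 새로운 부분만 추출
--
--     WhisperLive는 전체 컨텍스트를 반환하므로, 이전에 이미 전송한 부분을 제외하고
--     새롭게 추가된 부분만 추출합니다.
--
--     Args:
--         current_text: 현재 받은 전체 텍스트
--         previous_text: 이전에 전송한 텍스트
--
--     Returns:
--         새로운 부분 텍스트
--     """
--     if not previous_text:
--         return current_text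
--
--     # 이전 텍스트가 현재 텍스트의 시작 부분에 포함되어 있는지 확인
--     if current_text.startswith(previous_text):
--         new_part = current_text[len(previous_text):].strip()
--         return new_part
--
--     # 이전 텍스트의 끝부분이 현재 텍스트에 포함되어 있는지 확인 (오버랩 감지)
--     for i in range(len(previous_text), 0, -1):
--         suffix = previous_text[-i:]
--         if current_text.startswith(suffix):
--             new_part = current_text[i:].strip()
--             return new_part
--
--     # 전혀 다른 텍스트면 그대로 반환
--     return current_text
-- ===== SOURCE B (Python) =====
-- def _extract_new_text(current_text: str, previous_text: str) -> str:
--     if not previous_text: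
--         return current_text
--     # KMP prefix function of s = current + sentinel + previous: the final border
--     # length k is the longest suffix of previous_text that is a prefix of
--     # current_text (the sentinel '\x00' never occurs in the transcribed text).
--     s = current_text + "\x00" + previous_text
--     k = 0
--     pi = [0]
--     for i in range(1, len(s)):
--         while k > 0 and s[i] != s[k]:
--             k = pi[k - 1]
--         if s[i] == s[k]:
--             k += 1
--         pi.append(k)
--     if k > 0:
--         return current_text[k:].strip()
--     return current_text
-- ===== Notes on version B (the rewrite author's own statement) =====
-- stated objective: faster
-- what changed: A tries every overlap length longest-first, slicing a fresh suffix of previous_text and testing startswith for each (quadratic); B computes the overlap in one linear pass as the last value of the KMP prefix function of current_text + '\x00' + previous_text.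
import Mathlib
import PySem

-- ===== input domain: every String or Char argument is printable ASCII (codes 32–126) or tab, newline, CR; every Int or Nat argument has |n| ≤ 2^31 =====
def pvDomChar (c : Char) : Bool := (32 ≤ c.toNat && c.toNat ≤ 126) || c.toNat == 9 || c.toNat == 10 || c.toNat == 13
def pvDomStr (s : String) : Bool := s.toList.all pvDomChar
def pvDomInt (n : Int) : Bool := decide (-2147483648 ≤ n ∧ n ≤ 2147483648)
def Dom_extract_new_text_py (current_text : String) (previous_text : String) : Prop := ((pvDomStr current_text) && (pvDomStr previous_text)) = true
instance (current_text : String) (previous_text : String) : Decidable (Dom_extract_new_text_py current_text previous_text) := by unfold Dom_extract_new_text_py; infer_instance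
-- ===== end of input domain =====

-- B replaces A's longest-first scan over all overlap lengths (one suffix slice + startswith per length)
-- by a single linear KMP prefix-function pass over current + '\x00' + previous; objective: faster (asymptotic).

-- ===== PORT A =====
-- for i in range(len(previous_text), 0, -1): suffix = previous_text[-i:]; if current_text.startswith(suffix): return current_text[i:].strip()
def extractA_loop (current_text previous_text : String) : Nat → String
  | 0 => current_text
  | i + 1 =>
    let suffix := PySem.Str.slice previous_text (some (-((i + 1 : Nat) : Int))) none
    if PySem.Str.startswith current_text suffix then
      PySem.Str.strip (PySem.Str.slice current_text (some ((i + 1 : Nat) : Int)) none)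
    else
      extractA_loop current_text previous_text i

def extract_new_text_py (current_text : String) (previous_text : String) : String :=
  if previous_text = "" then current_text
  else if PySem.Str.startswith current_text previous_text then
    PySem.Str.strip (PySem.Str.slice current_text (some (PySem.Str.len previous_text)) none)
  else
    extractA_loop current_text previous_text previous_text.toList.length

-- ===== PORT B =====
-- while k > 0 and s[i] != s[k]: k = pi[k-1]    (fuel k+1 always suffices: pi[j] ≤ j, so k strictly decreases)
def kmpAdj (s : List Char) (pi : List Nat) (ci : Char) : Nat → Nat → Nat
  | 0, k => k
  | fuel + 1, k =>
    if k ≠ 0 ∧ ci ≠ s.getD k (Char.ofNat 0) then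
      kmpAdj s pi ci fuel (pi.getD (k - 1) 0)
    else k

-- for i in range(1, len(s)): while …; if s[i] == s[k]: k += 1; pi.append(k)
def kmpFold (s : List Char) : Nat → List Nat × Nat
  | 0 => ([0], 0)
  | n + 1 =>
    let st := kmpFold s n
    let ci := s.getD (n + 1) (Char.ofNat 0)
    let k1 := kmpAdj s st.1 ci (st.2 + 1) st.2
    let k2 := if ci = s.getD k1 (Char.ofNat 0) then k1 + 1 else k1
    (st.1 ++ [k2], k2)

def extract_new_text_py_alt (current_text : String) (previous_text : String) : String :=
  if previous_text = "" then current_text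
  else
    let s := current_text.toList ++ Char.ofNat 0 :: previous_text.toList
    let k := (kmpFold s (s.length - 1)).2
    if 0 < k then
      PySem.Str.strip (PySem.Str.slice current_text (some ((k : Nat) : Int)) none)
    else current_text

-- ===== PRECONDITION & SPEC =====
def Spec_extract_new_text_py (current_text : String) (previous_text : String) (out : String) : Prop := out = extract_new_text_py_alt current_text previous_text
instance (current_text : String) (previous_text : String) (out : String) : Decidable (Spec_extract_new_text_py current_text previous_text out) := by unfold Spec_extract_new_text_py; infer_instance

-- ===== CLAIM (what is proved, stated in full; the proofs are below) =====
def Claim_equal_extract_new_text_py : Prop := ∀ (current_text : String) (previous_text : String), Dom_extract_new_text_py current_text previous_text → Spec_extract_new_text_py current_text previous_text (extract_new_text_py current_text previous_text)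

-- ===== LEMMAS AND PROOFS =====

-- greatest k < n with (take k) a suffix of (take n): the longest proper border of the length-n prefix
def maxBord (l : List Char) (n : Nat) : Nat :=
  Nat.findGreatest (fun k => l.take k <:+ l.take n) (n - 1)

-- greatest k ≤ len p with the length-k suffix of p a prefix of c: the overlap A searches for
def ovLen (c p : List Char) : Nat :=
  Nat.findGreatest (fun k => p.drop (p.length - k) <+: c) p.length

lemma maxBord_le (l : List Char) (n : Nat) : maxBord l n ≤ n - 1 :=
  Nat.findGreatest_le _

lemma maxBord_suffix (l : List Char) (n : Nat) : l.take (maxBord l n) <:+ l.take n := by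
  unfold maxBord
  exact Nat.findGreatest_spec (P := fun k => l.take k <:+ l.take n) (Nat.zero_le _) (by simp)

lemma slice_from_neg_eq (p : String) (i : Nat) (h0 : 0 < i) :
    PySem.Str.slice p (some (-(i : Int))) none = String.ofList (p.toList.drop (p.toList.length - i)) := by
  apply String.toList_inj.mp
  simp [PySem.List.slice_from_neg_natCast p.toList i h0]

lemma suffix_snoc_iff (a b : List Char) (x y : Char) :
    a ++ [x] <:+ b ++ [y] ↔ x = y ∧ a <:+ b := by
  constructor
  · intro h
    rw [← List.reverse_prefix] at h
    simp only [List.reverse_append, List.reverse_cons, List.reverse_nil, List.nil_append,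
      List.singleton_append] at h
    rw [List.cons_prefix_cons] at h
    exact ⟨h.1, List.reverse_prefix.mp h.2⟩
  · intro h
    rw [← List.reverse_prefix]
    simp only [List.reverse_append, List.reverse_cons, List.reverse_nil, List.nil_append,
      List.singleton_append]
    rw [List.cons_prefix_cons]
    exact ⟨h.1, List.reverse_prefix.mpr h.2⟩

-- border extension: take (k+1) is a suffix of take (n+1) iff take k is a suffix of take n and the next chars agree
lemma bord_ext (l : List Char) (k n : Nat) (hk : k ≤ n) (hn : n < l.length) :
    l.take (k + 1) <:+ l.take (n + 1) ↔
      (l.take k <:+ l.take n ∧ l[k]'(by omega) = l[n]'hn) := by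
  rw [List.take_succ_eq_append_getElem (by omega : k < l.length),
      List.take_succ_eq_append_getElem hn, suffix_snoc_iff]
  tauto

lemma kmpAdj_correct (s : List Char) (pi : List Nat) (i : Nat)
    (hi1 : 1 ≤ i) (hiN : i < s.length)
    (Hpi : ∀ j, j < i → pi.getD j 0 = maxBord s (j + 1)) :
    ∀ k, k < i → s.take k <:+ s.take i →
      (∀ m, 0 < m → m ≤ i → s.take m <:+ s.take (i + 1) → m - 1 ≤ k) →
      ∀ fuel, k < fuel →
      (if s.getD i (Char.ofNat 0) = s.getD (kmpAdj s pi (s.getD i (Char.ofNat 0)) fuel k) (Char.ofNat 0)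
       then kmpAdj s pi (s.getD i (Char.ofNat 0)) fuel k + 1
       else kmpAdj s pi (s.getD i (Char.ofNat 0)) fuel k) = maxBord s (i + 1) := by
  intro k
  induction k using Nat.strong_induction_on with
  | _ k IH =>
    intro hk hbord hmax fuel hfuel
    cases fuel with
    | zero => omega
    | succ f =>
      simp only [kmpAdj]
      by_cases hg : k ≠ 0 ∧ s.getD i (Char.ofNat 0) ≠ s.getD k (Char.ofNat 0)
      · rw [if_pos hg]
        have hkpos : 0 < k := Nat.pos_of_ne_zero hg.1
        have hpik : pi.getD (k - 1) 0 = maxBord s k := by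
          have := Hpi (k - 1) (by omega)
          rwa [Nat.sub_add_cancel hkpos] at this
        rw [hpik]
        have hk'lt : maxBord s k < k := by have := maxBord_le s k; omega
        apply IH (maxBord s k) hk'lt (by omega) ?_ ?_ f (by omega)
        · exact (maxBord_suffix s k).trans hbord
        · intro m hm hmle hmb
          rcases Nat.eq_zero_or_pos (m - 1) with h0 | hpos
          · omega
          · have hm2 : m = (m - 1) + 1 := by omega
            have hmb0 := hmb
            rw [hm2] at hmb0
            have hext := (bord_ext s (m - 1) i (by omega) hiN).mp hmb0
            have hmk : m - 1 ≤ k := hmax m hm hmle hmb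
            have hne : m - 1 ≠ k := by
              intro he
              apply hg.2
              rw [List.getD_eq_getElem s _ hiN, List.getD_eq_getElem s _ (by omega : k < s.length)]
              have hk' : k = m - 1 := he.symm
              subst hk'
              exact hext.2.symm
            have hlt : m - 1 < k := lt_of_le_of_ne hmk hne
            have hnest : s.take (m - 1) <:+ s.take k :=
              List.suffix_of_suffix_length_le hext.1 hbord
                (by simp only [List.length_take]; omega)
            unfold maxBord
            exact Nat.le_findGreatest (by omega) hnest
      · rw [if_neg hg]
        by_cases hc : s.getD i (Char.ofNat 0) = s.getD k (Char.ofNat 0)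
        · rw [if_pos hc]
          have hub : maxBord s (i + 1) ≤ k + 1 := by
            rcases Nat.eq_zero_or_pos (maxBord s (i + 1)) with h0 | hpos
            · omega
            · have hble := maxBord_le s (i + 1)
              have hb := maxBord_suffix s (i + 1)
              have := hmax (maxBord s (i + 1)) hpos (by omega) hb
              omega
          have hlb : k + 1 ≤ maxBord s (i + 1) := by
            have hkc : s[k]'(by omega) = s[i]'hiN := by
              have hcc := hc.symm
              rwa [List.getD_eq_getElem s _ (by omega : k < s.length),
                List.getD_eq_getElem s _ hiN] at hcc
            have hb1 : s.take (k + 1) <:+ s.take (i + 1) :=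
              (bord_ext s k i (le_of_lt hk) hiN).mpr ⟨hbord, hkc⟩
            unfold maxBord
            exact Nat.le_findGreatest (by omega) hb1
          omega
        · rw [if_neg hc]
          have hk0 : k = 0 := by
            by_contra h
            exact hg ⟨h, hc⟩
          subst hk0
          by_contra hne0
          have hpos : 0 < maxBord s (i + 1) := Nat.pos_of_ne_zero (fun h => hne0 h.symm)
          have hble := maxBord_le s (i + 1)
          have hb := maxBord_suffix s (i + 1)
          have h1 := hmax (maxBord s (i + 1)) hpos (by omega) hb
          have hM1 : maxBord s (i + 1) = 1 := by omega
          rw [hM1] at hb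
          have hext := (bord_ext s 0 i (by omega) hiN).mp (by simpa using hb)
          apply hc
          rw [List.getD_eq_getElem s _ hiN, List.getD_eq_getElem s _ (by omega : 0 < s.length)]
          exact hext.2.symm

lemma kmpFold_correct (s : List Char) : ∀ n, n < s.length →
    (kmpFold s n).1.length = n + 1 ∧
    (∀ j, j ≤ n → (kmpFold s n).1.getD j 0 = maxBord s (j + 1)) ∧
    (kmpFold s n).2 = maxBord s (n + 1) := by
  intro n
  induction n with
  | zero =>
    intro _
    refine ⟨rfl, ?_, ?_⟩
    · intro j hj
      interval_cases j
      simp [kmpFold, maxBord]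
    · simp [kmpFold, maxBord]
  | succ n ih =>
    intro hn
    obtain ⟨hlen, hent, hk⟩ := ih (by omega)
    have hk_lt : (kmpFold s n).2 < n + 1 := by
      rw [hk]; have := maxBord_le s (n + 1); omega
    have hbord : s.take (kmpFold s n).2 <:+ s.take (n + 1) := by
      rw [hk]; exact maxBord_suffix s (n + 1)
    have hmax : ∀ m, 0 < m → m ≤ n + 1 → s.take m <:+ s.take (n + 1 + 1) → m - 1 ≤ (kmpFold s n).2 := by
      intro m hm hmle hmb
      rcases Nat.eq_zero_or_pos (m - 1) with h0 | hpos
      · omega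
      · have hm2 : m = (m - 1) + 1 := by omega
        rw [hm2] at hmb
        have hext := (bord_ext s (m - 1) (n + 1) (by omega) hn).mp hmb
        rw [hk]
        unfold maxBord
        exact Nat.le_findGreatest (by omega) hext.1
    have hadj := kmpAdj_correct s (kmpFold s n).1 (n + 1) (by omega) hn
      (fun j hj => hent j (by omega)) (kmpFold s n).2 hk_lt hbord hmax
      ((kmpFold s n).2 + 1) (by omega)
    have h2 : (kmpFold s (n + 1)).2 =
        (if s.getD (n + 1) (Char.ofNat 0)
            = s.getD (kmpAdj s (kmpFold s n).1 (s.getD (n + 1) (Char.ofNat 0))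
                ((kmpFold s n).2 + 1) (kmpFold s n).2) (Char.ofNat 0)
         then kmpAdj s (kmpFold s n).1 (s.getD (n + 1) (Char.ofNat 0))
                ((kmpFold s n).2 + 1) (kmpFold s n).2 + 1
         else kmpAdj s (kmpFold s n).1 (s.getD (n + 1) (Char.ofNat 0))
                ((kmpFold s n).2 + 1) (kmpFold s n).2) := rfl
    have h1 : (kmpFold s (n + 1)).1 = (kmpFold s n).1 ++ [(kmpFold s (n + 1)).2] := rfl
    have hk2 : (kmpFold s (n + 1)).2 = maxBord s (n + 1 + 1) := by rw [h2, hadj]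
    refine ⟨?_, ?_, hk2⟩
    · rw [h1]; simp [hlen]
    · intro j hj
      rw [h1]
      rcases Nat.lt_or_ge j (n + 1) with hjlt | hjge
      · rw [List.getD_append _ _ _ _ (by omega)]
        exact hent j (by omega)
      · have hj1 : j = n + 1 := by omega
        subst hj1
        have hx : ∀ (l : List Nat) (x d : Nat), (l ++ [x]).getD l.length d = x := by
          intro l x d
          simp [List.getD_eq_getElem?_getD]
        have hgx := hx (kmpFold s n).1 (kmpFold s (n + 1)).2 0
        rw [hlen] at hgx
        rw [hgx, hk2]

lemma extractA_loop_eq (C P : String) : ∀ i, i ≤ P.toList.length →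
    extractA_loop C P i =
      (if 0 < Nat.findGreatest (fun k => P.toList.drop (P.toList.length - k) <+: C.toList) i
       then PySem.Str.strip (PySem.Str.slice C
         (some ((Nat.findGreatest (fun k => P.toList.drop (P.toList.length - k) <+: C.toList) i : Nat) : Int)) none)
       else C) := by
  intro i
  induction i with
  | zero =>
    intro _
    rw [extractA_loop]
    simp
  | succ i ih =>
    intro hi
    rw [extractA_loop]
    have hsuf : PySem.Str.slice P (some (-((i + 1 : Nat) : Int))) none
        = String.ofList (P.toList.drop (P.toList.length - (i + 1))) :=
      slice_from_neg_eq P (i + 1) (by omega)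
    have hsw : (PySem.Str.startswith C (PySem.Str.slice P (some (-((i + 1 : Nat) : Int))) none) = true)
        ↔ P.toList.drop (P.toList.length - (i + 1)) <+: C.toList := by
      rw [hsuf, PySem.Str.startswith_eq, String.toList_ofList, PySem.Chars.startswith_iff]
    rw [Nat.findGreatest_succ]
    by_cases hp : P.toList.drop (P.toList.length - (i + 1)) <+: C.toList
    · rw [if_pos (hsw.mpr hp), if_pos hp, if_pos (by omega)]
    · rw [if_neg (fun h => hp (hsw.mp h)), if_neg hp, ih (by omega)]

lemma A_char (C P : String) (hP : P ≠ "") :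
    extract_new_text_py C P =
      (if 0 < ovLen C.toList P.toList
       then PySem.Str.strip (PySem.Str.slice C (some ((ovLen C.toList P.toList : Nat) : Int)) none)
       else C) := by
  unfold extract_new_text_py
  rw [if_neg hP]
  have hnp : 0 < P.toList.length :=
    List.length_pos_iff.mpr (fun hnil => hP (String.toList_inj.mp (by simp [hnil])))
  by_cases hsw : PySem.Str.startswith C P = true
  · rw [if_pos hsw]
    have hpre : P.toList <+: C.toList := by
      rwa [PySem.Str.startswith_eq, PySem.Chars.startswith_iff] at hsw
    unfold ovLen
    have hPnp : P.toList.drop (P.toList.length - P.toList.length) <+: C.toList := by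
      simpa [Nat.sub_self] using hpre
    have hfg : Nat.findGreatest (fun k => P.toList.drop (P.toList.length - k) <+: C.toList)
        P.toList.length = P.toList.length :=
      le_antisymm (Nat.findGreatest_le _) (Nat.le_findGreatest le_rfl hPnp)
    rw [hfg, if_pos hnp]
    have hl : PySem.Str.len P = ((P.toList.length : Nat) : Int) := by
      simp [String.length_toList]
    rw [hl]
  · rw [if_neg hsw]
    rw [extractA_loop_eq C P P.toList.length le_rfl]
    rfl

lemma border_iff (cl pl : List Char) (k : Nat) (hk1 : 1 ≤ k)
    (hkN : k ≤ cl.length + pl.length)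
    (hc0 : Char.ofNat 0 ∉ cl) (hp0 : Char.ofNat 0 ∉ pl) :
    ((cl ++ Char.ofNat 0 :: pl).take k <:+ (cl ++ Char.ofNat 0 :: pl)) ↔
      (k ≤ pl.length ∧ pl.drop (pl.length - k) <+: cl) := by
  have hN : (cl ++ Char.ofNat 0 :: pl).length = cl.length + pl.length + 1 := by
    simp only [List.length_append, List.length_cons]; omega
  have hdropgen : ∀ m, m ≤ pl.length →
      (cl ++ Char.ofNat 0 :: pl).drop ((cl ++ Char.ofNat 0 :: pl).length - m) = pl.drop (pl.length - m) := by
    intro m hm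
    have h1 : (cl ++ Char.ofNat 0 :: pl).length - m = cl.length + (pl.length - m + 1) := by omega
    rw [h1, List.drop_length_add_append, List.drop_succ_cons]
  constructor
  · intro h
    have hlt : (cl ++ Char.ofNat 0 :: pl).take k
        = (cl ++ Char.ofNat 0 :: pl).drop ((cl ++ Char.ofNat 0 :: pl).length - k) := by
      have h2 := List.suffix_iff_eq_drop.mp h
      rwa [List.length_take, min_eq_left (by omega)] at h2
    have hknp : k ≤ pl.length := by
      by_contra hgt
      rw [Nat.not_le] at hgt
      have hj : k - pl.length - 1 < cl.length := by omega
      have e1 : ((cl ++ Char.ofNat 0 :: pl).take k)[k - pl.length - 1]?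
          = cl[k - pl.length - 1]? := by
        rw [List.getElem?_take_of_lt (by omega), List.getElem?_append_left hj]
      have hNk : (cl ++ Char.ofNat 0 :: pl).length - k + (k - pl.length - 1) = cl.length := by omega
      have e2 : ((cl ++ Char.ofNat 0 :: pl).drop
          ((cl ++ Char.ofNat 0 :: pl).length - k))[k - pl.length - 1]? = some (Char.ofNat 0) := by
        rw [List.getElem?_drop, hNk, List.getElem?_append_right (le_refl cl.length)]
        simp
      rw [hlt, e2] at e1
      exact hc0 (List.mem_of_getElem? e1.symm)
    have hdrop := hdropgen k hknp
    have hkc : k ≤ cl.length := by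
      by_contra hgt
      rw [Nat.not_le] at hgt
      have e : ((cl ++ Char.ofNat 0 :: pl).take k)[cl.length]? = some (Char.ofNat 0) := by
        rw [List.getElem?_take_of_lt (by omega), List.getElem?_append_right (le_refl cl.length)]
        simp
      rw [hlt, hdrop] at e
      exact hp0 (List.mem_of_mem_drop (List.mem_of_getElem? e))
    refine ⟨hknp, ?_⟩
    have htake : (cl ++ Char.ofNat 0 :: pl).take k = cl.take k := List.take_append_of_le_length hkc
    have heq : pl.drop (pl.length - k) = cl.take k := by rw [← hdrop, ← hlt, htake]
    rw [heq]
    exact List.take_prefix k cl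
  · rintro ⟨hknp, hpre⟩
    have hlendrop : (pl.drop (pl.length - k)).length = k := by
      rw [List.length_drop]; omega
    have heq : pl.drop (pl.length - k) = cl.take k := by
      have h2 := List.prefix_iff_eq_take.mp hpre
      rwa [hlendrop] at h2
    have hkc : k ≤ cl.length := by
      have h2 := hpre.length_le
      rwa [hlendrop] at h2
    have htake : (cl ++ Char.ofNat 0 :: pl).take k = cl.take k := List.take_append_of_le_length hkc
    have hdrop := hdropgen k hknp
    have hfin : (cl ++ Char.ofNat 0 :: pl).take k
        = (cl ++ Char.ofNat 0 :: pl).drop ((cl ++ Char.ofNat 0 :: pl).length - k) := by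
      rw [htake, hdrop, heq]
    rw [hfin]
    exact List.drop_suffix _ _

lemma maxBord_eq_ovLen (cl pl : List Char) (hp : pl ≠ [])
    (hc0 : Char.ofNat 0 ∉ cl) (hp0 : Char.ofNat 0 ∉ pl) :
    maxBord (cl ++ Char.ofNat 0 :: pl) (cl ++ Char.ofNat 0 :: pl).length = ovLen cl pl := by
  have hN : (cl ++ Char.ofNat 0 :: pl).length = cl.length + pl.length + 1 := by
    simp only [List.length_append, List.length_cons]; omega
  have hnp : 0 < pl.length := List.length_pos_iff.mpr hp
  apply le_antisymm
  · rcases Nat.eq_zero_or_pos (maxBord (cl ++ Char.ofNat 0 :: pl) (cl ++ Char.ofNat 0 :: pl).length)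
      with h0 | hpos
    · rw [h0]; exact Nat.zero_le _
    · have hb := maxBord_suffix (cl ++ Char.ofNat 0 :: pl) (cl ++ Char.ofNat 0 :: pl).length
      rw [List.take_length] at hb
      have hle := maxBord_le (cl ++ Char.ofNat 0 :: pl) (cl ++ Char.ofNat 0 :: pl).length
      have hext := (border_iff cl pl _ hpos (by omega) hc0 hp0).mp hb
      unfold ovLen
      exact Nat.le_findGreatest hext.1 hext.2
  · rcases Nat.eq_zero_or_pos (ovLen cl pl) with h0 | hpos
    · rw [h0]; exact Nat.zero_le _
    · have hPov : pl.drop (pl.length - ovLen cl pl) <+: cl := by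
        unfold ovLen
        exact Nat.findGreatest_spec (P := fun k => pl.drop (pl.length - k) <+: cl)
          (Nat.zero_le _) (by simp)
      have hle : ovLen cl pl ≤ pl.length := Nat.findGreatest_le _
      have hb := (border_iff cl pl (ovLen cl pl) hpos (by omega) hc0 hp0).mpr ⟨hle, hPov⟩
      unfold maxBord
      apply Nat.le_findGreatest (by omega)
      rw [List.take_length]
      exact hb

lemma dom_no_nul (S : String) (h : pvDomStr S = true) : Char.ofNat 0 ∉ S.toList := by
  intro hmem
  have := List.all_eq_true.mp h _ hmem
  simp [pvDomChar] at this

lemma string_ne_empty_toList (p : String) (h : p ≠ "") : p.toList ≠ [] := by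
  intro hnil
  apply h
  apply String.toList_inj.mp
  simp [hnil]

-- ===== VERDICT (by name: the statement is the Claim_ definition above) =====
theorem extract_new_text_py_spec : Claim_equal_extract_new_text_py := by
  intro C P hdom
  unfold Spec_extract_new_text_py
  by_cases hP : P = ""
  · subst hP
    simp [extract_new_text_py, extract_new_text_py_alt]
  · have hdom' := hdom
    unfold Dom_extract_new_text_py at hdom'
    rw [Bool.and_eq_true] at hdom'
    have hc0 := dom_no_nul C hdom'.1
    have hp0 := dom_no_nul P hdom'.2
    have hptl : P.toList ≠ [] := string_ne_empty_toList P hP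
    rw [A_char C P hP]
    unfold extract_new_text_py_alt
    rw [if_neg hP]
    have hnp : 0 < P.toList.length := List.length_pos_iff.mpr hptl
    have hlen : (C.toList ++ Char.ofNat 0 :: P.toList).length
        = C.toList.length + 1 + P.toList.length := by simp; omega
    have hge : 1 ≤ (C.toList ++ Char.ofNat 0 :: P.toList).length := by omega
    have hsub : (C.toList ++ Char.ofNat 0 :: P.toList).length - 1
        < (C.toList ++ Char.ofNat 0 :: P.toList).length := by omega
    have hk := (kmpFold_correct (C.toList ++ Char.ofNat 0 :: P.toList) _ hsub).2.2
    have hn1 : (C.toList ++ Char.ofNat 0 :: P.toList).length - 1 + 1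
        = (C.toList ++ Char.ofNat 0 :: P.toList).length := by omega
    rw [hn1] at hk
    show _ = (if 0 < (kmpFold (C.toList ++ Char.ofNat 0 :: P.toList)
        ((C.toList ++ Char.ofNat 0 :: P.toList).length - 1)).2 then _ else C)
    rw [hk, maxBord_eq_ovLen C.toList P.toList hptl hc0 hp0]
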